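-- pv_equiv track=rewrite | github.com/zhimin8177/HMM_Tagging_2022 | hmmtagging.py | generate_dict
-- ===== SOURCE A (Python) =====
-- def generate_dict(s):
--     worddict = {} #例：{"词1":1，"词2":2}
--     flagdict = {} #例：{"词性1":1，"词性2":2}
--     word_id_count = 0
--     flag_id_count = 0
--     for i in s: #读取文档的每一行
--         word_count = len(i)
--         for j in i: #读取行中每个单词
--             if j[0] not in worddict:
--                 worddict[j[0]] = word_id_count
--                 word_id_count += 1
--             if j[1] not in flagdict:
--                 flagdict[j[1]] = flag_id_count
--                 flag_id_count += 1
--     return worddict,flagdict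
-- ===== SOURCE B (Python) =====
-- def generate_dict(s):
--     # Collect-then-index: gather words/flags in A's access order, dedupe in
--     # first-occurrence order with dict.fromkeys, then number in one pass.
--     words = []
--     flags = []
--     for i in s:
--         for j in i:
--             words.append(j[0])
--             flags.append(j[1])
--     worddict = {w: k for k, w in enumerate(dict.fromkeys(words))}
--     flagdict = {f: k for k, f in enumerate(dict.fromkeys(flags))}
--     return worddict, flagdict
-- ===== Notes on version B (the rewrite author's own statement) =====
-- stated objective: alternative
-- what changed: Replaces A's inline membership-check-with-running-counters by a collect-then-index decomposition: one pass appends all words and tags to ordered lists, then dict.fromkeys dedupes in first-occurrence order and enumerate assigns the ids.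
import Mathlib
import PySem

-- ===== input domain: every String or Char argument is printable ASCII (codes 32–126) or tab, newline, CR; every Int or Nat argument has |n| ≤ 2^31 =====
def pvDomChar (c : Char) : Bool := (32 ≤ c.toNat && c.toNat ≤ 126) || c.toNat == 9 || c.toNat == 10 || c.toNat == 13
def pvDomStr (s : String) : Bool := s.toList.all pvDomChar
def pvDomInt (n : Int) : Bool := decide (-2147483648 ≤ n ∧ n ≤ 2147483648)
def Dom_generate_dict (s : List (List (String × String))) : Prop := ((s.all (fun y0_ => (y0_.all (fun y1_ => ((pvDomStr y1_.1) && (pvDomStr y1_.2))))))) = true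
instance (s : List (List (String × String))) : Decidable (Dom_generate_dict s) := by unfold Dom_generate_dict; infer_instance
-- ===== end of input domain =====

-- B replaces A's inline membership-check-with-counters by a collect-then-index
-- decomposition (gather all words/tags, dedupe in first-occurrence order, number
-- them in a separate pass); alternative structure, same results.


-- ===== PORT A =====
-- state = (worddict, flagdict, word_id_count, flag_id_count); dicts are
-- association lists, `not in` is membership among the keys (A only ever
-- appends a fresh key, so appending is the exact dict insertion here).
def pvStepA (st : (List (String × Int)) × (List (String × Int)) × Int × Int)
    (j : String × String) : (List (String × Int)) × (List (String × Int)) × Int × Int :=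
  let st :=
    if (st.1.map Prod.fst).contains j.1 then st
    else (st.1 ++ [(j.1, st.2.2.1)], st.2.1, st.2.2.1 + 1, st.2.2.2)
  if (st.2.1.map Prod.fst).contains j.2 then st
  else (st.1, st.2.1 ++ [(j.2, st.2.2.2)], st.2.2.1, st.2.2.2 + 1)

def generate_dict (s : List (List (String × String))) : (List (String × Int)) × (List (String × Int)) :=
  let st := s.foldl (fun st i =>
      let _word_count := i.length    -- word_count = len(i)  (unused, as in A)
      i.foldl pvStepA st)
    (([] : List (String × Int)), ([] : List (String × Int)), (0 : Int), (0 : Int))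
  (st.1, st.2.1)

-- ===== PORT B =====
-- words.append(j[0]); flags.append(j[1])
def pvStepB (acc : List String × List String) (j : String × String) : List String × List String :=
  (acc.1 ++ [j.1], acc.2 ++ [j.2])

-- {w: k for k, w in enumerate(...)}
def pvNumber (ys : List String) : List (String × Int) :=
  (PySem.List.enumerate ys).map (fun p => (p.2, p.1))

def generate_dict_alt (s : List (List (String × String))) : (List (String × Int)) × (List (String × Int)) :=
  let wf := s.foldl (fun acc i => i.foldl pvStepB acc) (([] : List String), ([] : List String))
  (pvNumber (PySem.List.dedup wf.1), pvNumber (PySem.List.dedup wf.2))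

-- ===== PRECONDITION & SPEC =====
def Spec_generate_dict (s : List (List (String × String))) (out : (List (String × Int)) × (List (String × Int))) : Prop := out = generate_dict_alt s
instance (s : List (List (String × String))) (out : (List (String × Int)) × (List (String × Int))) : Decidable (Spec_generate_dict s out) := by unfold Spec_generate_dict; infer_instance

-- ===== CLAIM (what is proved, stated in full; the proofs are below) =====
def Claim_equal_generate_dict : Prop := ∀ (s : List (List (String × String))), Dom_generate_dict s → Spec_generate_dict s (generate_dict s)

-- ===== LEMMAS AND PROOFS =====

theorem pvNumber_keys (ys : List String) : (pvNumber ys).map Prod.fst = ys := by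
  simp [pvNumber, List.map_map, Function.comp_def]

theorem pvNumber_append (ys : List String) (w : String) :
    pvNumber (ys ++ [w]) = pvNumber ys ++ [(w, (ys.length : Int))] := by
  unfold pvNumber
  rw [PySem.List.enumerate_append]
  simp

theorem dedup_append_singleton (xs : List String) (w : String) :
    PySem.List.dedup (xs ++ [w])
      = if w ∈ xs then PySem.List.dedup xs else PySem.List.dedup xs ++ [w] := by
  simp [pysem, PySem.Set.add]

theorem pvStepA_spec (ws fs : List String) (j : String × String) :
    pvStepA (pvNumber (PySem.List.dedup ws), pvNumber (PySem.List.dedup fs),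
             ((PySem.List.dedup ws).length : Int), ((PySem.List.dedup fs).length : Int)) j
      = (pvNumber (PySem.List.dedup (ws ++ [j.1])), pvNumber (PySem.List.dedup (fs ++ [j.2])),
         ((PySem.List.dedup (ws ++ [j.1])).length : Int), ((PySem.List.dedup (fs ++ [j.2])).length : Int)) := by
  unfold pvStepA
  rw [dedup_append_singleton ws, dedup_append_singleton fs]
  by_cases hw : j.1 ∈ ws <;> by_cases hf : j.2 ∈ fs <;>
    simp [pvNumber_keys, pvNumber_append, List.contains_eq_mem, hw, hf]

theorem foldl_pvStepA (ps : List (String × String)) (ws fs : List String) :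
    ps.foldl pvStepA (pvNumber (PySem.List.dedup ws), pvNumber (PySem.List.dedup fs),
        ((PySem.List.dedup ws).length : Int), ((PySem.List.dedup fs).length : Int))
      = (pvNumber (PySem.List.dedup (ws ++ ps.map Prod.fst)),
         pvNumber (PySem.List.dedup (fs ++ ps.map Prod.snd)),
         ((PySem.List.dedup (ws ++ ps.map Prod.fst)).length : Int),
         ((PySem.List.dedup (fs ++ ps.map Prod.snd)).length : Int)) := by
  induction ps generalizing ws fs with
  | nil => simp
  | cons j ps ih =>
    simp only [List.foldl_cons, pvStepA_spec, List.map_cons]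
    rw [ih (ws ++ [j.1]) (fs ++ [j.2])]
    simp

theorem foldl_pvStepB (ps : List (String × String)) (ws fs : List String) :
    ps.foldl pvStepB (ws, fs) = (ws ++ ps.map Prod.fst, fs ++ ps.map Prod.snd) := by
  induction ps generalizing ws fs with
  | nil => simp
  | cons j ps ih =>
    simp only [List.foldl_cons, pvStepB, List.map_cons]
    rw [ih]
    simp

-- ===== VERDICT (by name: the statement is the Claim_ definition above) =====
theorem generate_dict_spec : Claim_equal_generate_dict := by
  intro s _
  show generate_dict s = generate_dict_alt s
  unfold generate_dict generate_dict_alt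
  have hA : s.foldl (fun st i => let _word_count := i.length; i.foldl pvStepA st)
        (([] : List (String × Int)), ([] : List (String × Int)), (0 : Int), (0 : Int))
      = s.flatten.foldl pvStepA (([] : List (String × Int)), ([] : List (String × Int)), (0 : Int), (0 : Int)) := by
    rw [List.foldl_flatten]
  have hB : s.foldl (fun acc i => i.foldl pvStepB acc) (([] : List String), ([] : List String))
      = s.flatten.foldl pvStepB (([] : List String), ([] : List String)) := by
    rw [List.foldl_flatten]
  rw [hA, hB, foldl_pvStepB]
  have h := foldl_pvStepA s.flatten [] []
  simp only [List.nil_append] at h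
  have h0 : (pvNumber (PySem.List.dedup ([] : List String)), pvNumber (PySem.List.dedup ([] : List String)),
      ((PySem.List.dedup ([] : List String)).length : Int), ((PySem.List.dedup ([] : List String)).length : Int))
      = (([] : List (String × Int)), ([] : List (String × Int)), (0 : Int), (0 : Int)) := rfl
  rw [h0] at h
  rw [h]
  simp
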